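-- pv_equiv track=rewrite | github.com/phamHang233/back-end | app/utils/math_utils.py | get_histogram
-- ===== SOURCE A (Python) =====
-- def get_histogram(values: list, ranges: list, field_name='numberOfValues'):
--     if not values or not ranges:
--         return []
--
--     values = sorted(values)
--
--     if not ranges:
--         return [{
--             'startValue': values[0],
--             'endValue': values[-1],
--             field_name: len(values)
--         }]
--
--     pre_value = values[0]
--     if pre_value < ranges[0]:
--         ranges.insert(0, pre_value)
--
--     post_value = values[-1]
--     if post_value > ranges[-1]:
--         ranges.append(post_value + 1)
--
--     histogram = []
--     for idx, s in enumerate(ranges[:-1]):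
--         t = ranges[idx + 1]
--         n = len([v for v in values if s <= v < t])
--         histogram.append({
--             'startValue': s,
--             'endValue': t,
--             field_name: n
--         })
--     return histogram
-- ===== SOURCE B (Python) =====
-- # B: binary-search (hand-written bisect_left) on the sorted values per bin boundary,
-- # O((N+R) log N) instead of A's per-bin linear scans; return value only -- unlike A,
-- # B does not mutate the `ranges` argument in place.
-- def get_histogram(values: list, ranges: list, field_name='numberOfValues'):
--     if not values or not ranges:
--         return []
--
--     vs = sorted(values)
--     bounds = list(ranges)
--     if vs[0] < bounds[0]:
--         bounds.insert(0, vs[0])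
--     if vs[-1] > bounds[-1]:
--         bounds.append(vs[-1] + 1)
--
--     def rank(x):
--         # index of the first element of vs that is >= x (bisect_left by hand)
--         lo, hi = 0, len(vs)
--         while lo < hi:
--             mid = (lo + hi) // 2
--             if vs[mid] < x:
--                 lo = mid + 1
--             else:
--                 hi = mid
--         return lo
--
--     pos = [rank(b) for b in bounds]
--     return [{'startValue': bounds[i],
--              'endValue': bounds[i + 1],
--              field_name: max(0, pos[i + 1] - pos[i])}
--             for i in range(len(bounds) - 1)]
-- ===== Notes on version B (the rewrite author's own statement) =====
-- stated objective: faster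
-- what changed: B replaces A's per-bin linear scan of all values with a hand-written binary search (bisect_left) on the sorted values, counting each bin as the difference of two boundary ranks (clamped at 0); B also does not mutate the ranges argument.
import Mathlib
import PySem

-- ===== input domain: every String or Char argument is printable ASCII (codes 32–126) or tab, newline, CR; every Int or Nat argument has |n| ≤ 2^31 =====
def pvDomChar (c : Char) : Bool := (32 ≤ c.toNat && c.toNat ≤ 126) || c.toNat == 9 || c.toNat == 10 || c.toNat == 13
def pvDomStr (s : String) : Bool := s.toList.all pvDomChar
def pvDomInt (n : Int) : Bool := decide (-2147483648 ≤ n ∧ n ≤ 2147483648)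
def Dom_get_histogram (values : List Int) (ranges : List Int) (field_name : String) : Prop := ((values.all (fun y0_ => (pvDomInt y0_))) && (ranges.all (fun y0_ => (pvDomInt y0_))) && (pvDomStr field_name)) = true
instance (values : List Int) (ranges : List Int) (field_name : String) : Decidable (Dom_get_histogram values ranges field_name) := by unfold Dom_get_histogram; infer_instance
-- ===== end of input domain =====

-- B counts each bin via binary search on the sorted values (rank differences) instead of A's
-- per-bin linear scans; equivalence is about the RETURN value only (A mutates `ranges` in place, B does not).


-- ===== PORT A =====
-- {'startValue': s, 'endValue': t, field_name: n} (Python dict literal, overwrite-in-place semantics)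
def pyDict3 (s t : Int) (fn : String) (n : Int) : List (String × Int) :=
  ((((PySem.Dict.empty).insert "startValue" s).insert "endValue" t).insert fn n).items

-- the `for idx, s in enumerate(ranges[:-1]): t = ranges[idx+1] ...` loop: walk adjacent pairs
def histA (vs : List Int) (fn : String) : List Int → List (List (String × Int))
  | s :: t :: rest =>
      pyDict3 s t fn ((vs.filter (fun v => decide (s ≤ v) && decide (v < t))).length : Int)
        :: histA vs fn (t :: rest)
  | _ => []

def get_histogram (values : List Int) (ranges : List Int) (field_name : String) : List (List (String × Int)) :=
  if values = [] ∨ ranges = [] then []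
  else
    let vs := PySem.List.sorted values (fun x => x) false
    -- literal port of A's dead `if not ranges:` branch (unreachable: ranges ≠ [] here,
    -- so the headD/getLastD defaults are never exercised)
    if ranges = [] then
      [pyDict3 (vs.headD 0) (vs.getLastD 0) field_name (vs.length : Int)]
    else
      let pre := vs.headD 0                              -- values[0] (vs nonempty)
      let r1 := if pre < ranges.headD 0 then pre :: ranges else ranges
      let post := vs.getLastD 0                          -- values[-1]
      let r2 := if post > r1.getLastD 0 then r1 ++ [post + 1] else r1
      histA vs field_name r2

-- ===== PORT B =====
-- hand-written bisect_left loop of Source B: first index in vs[lo:hi) whose value is ≥ x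
-- (vs[mid] is in range whenever hi ≤ vs.length, so getD is exact; (lo+hi)//2 on Nat = Python's)
def rankB (vs : List Int) (x : Int) (lo hi : Nat) : Nat :=
  if lo < hi then
    let mid := (lo + hi) / 2
    if vs.getD mid 0 < x then rankB vs x (mid + 1) hi else rankB vs x lo mid
  else lo
termination_by hi - lo
decreasing_by all_goals omega

-- Source B's final comprehension: walk bounds and their rank list in lockstep
def histB (fn : String) : List Int → List Nat → List (List (String × Int))
  | s :: t :: bs, p :: q :: ps =>
      pyDict3 s t fn (max 0 ((q : Int) - (p : Int))) :: histB fn (t :: bs) (q :: ps)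
  | _, _ => []

def get_histogram_alt (values : List Int) (ranges : List Int) (field_name : String) : List (List (String × Int)) :=
  if values = [] ∨ ranges = [] then []
  else
    let vs := PySem.List.sorted values (fun x => x) false
    let b1 := if vs.headD 0 < ranges.headD 0 then vs.headD 0 :: ranges else ranges
    let b2 := if vs.getLastD 0 > b1.getLastD 0 then b1 ++ [vs.getLastD 0 + 1] else b1
    let pos := b2.map (fun b => rankB vs b 0 vs.length)
    histB field_name b2 pos

-- ===== PRECONDITION & SPEC =====
def Spec_get_histogram (values : List Int) (ranges : List Int) (field_name : String) (out : List (List (String × Int))) : Prop := out = get_histogram_alt values ranges field_name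
instance (values : List Int) (ranges : List Int) (field_name : String) (out : List (List (String × Int))) : Decidable (Spec_get_histogram values ranges field_name out) := by unfold Spec_get_histogram; infer_instance

-- ===== CLAIM (what is proved, stated in full; the proofs are below) =====
def Claim_equal_get_histogram : Prop := ∀ (values : List Int) (ranges : List Int) (field_name : String), Dom_get_histogram values ranges field_name → Spec_get_histogram values ranges field_name (get_histogram values ranges field_name)

-- ===== LEMMAS AND PROOFS =====

-- In a nondecreasing list, position i holds a value < x exactly when i is below the count of values < x.
lemma sorted_lt_iff_lt_countP (x : Int) :
    ∀ (vs : List Int), vs.Pairwise (· ≤ ·) →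
      ∀ i, i < vs.length → (vs.getD i 0 < x ↔ i < vs.countP (fun v => decide (v < x))) := by
  intro vs
  induction vs with
  | nil => intro _ i hi; simp at hi
  | cons a tl ih =>
    intro hp i hi
    have hal : ∀ b ∈ tl, a ≤ b := fun b hb => (List.pairwise_cons.mp hp).1 b hb
    have htl : tl.Pairwise (· ≤ ·) := (List.pairwise_cons.mp hp).2
    by_cases hax : a < x
    · cases i with
      | zero =>
        simp [hax]
      | succ j =>
        have hj : j < tl.length := by simpa using hi
        have h2 := ih htl j hj
        simp only [List.getD] at h2
        simp [hax, h2]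
    · have hz : tl.countP (fun v => decide (v < x)) = 0 := by
        apply List.countP_eq_zero.mpr
        intro b hb
        have : a ≤ b := hal b hb
        simp; omega
      cases i with
      | zero => simp [hax, hz]
      | succ j =>
        have hj : j < tl.length := by simpa using hi
        have hmem : tl.getD j 0 ∈ tl := by
          rw [List.getD_eq_getElem _ _ hj]; exact List.getElem_mem hj
        have h2 : a ≤ tl.getD j 0 := hal _ hmem
        simp only [List.getD] at h2
        simp [hax, hz]
        omega
  
-- Binary-search correctness against any r characterizing the boundary.
lemma rankB_eq_of_iff (vs : List Int) (x : Int) (r : Nat)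
    (hiff : ∀ i, i < vs.length → (vs.getD i 0 < x ↔ i < r)) :
    ∀ (n lo hi : Nat), hi - lo ≤ n → lo ≤ r → r ≤ hi → hi ≤ vs.length →
      rankB vs x lo hi = r := by
  intro n
  induction n with
  | zero =>
    intro lo hi hfuel hlo hhi hlen
    rw [rankB]
    have : ¬ lo < hi := by omega
    simp [this]; omega
  | succ m ih =>
    intro lo hi hfuel hlo hhi hlen
    rw [rankB]
    by_cases h : lo < hi
    · simp only [h, if_true]
      have hmidlo : lo ≤ (lo + hi) / 2 := by omega
      have hmidhi : (lo + hi) / 2 < hi := by omega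
      have hmlen : (lo + hi) / 2 < vs.length := by omega
      by_cases hv : vs.getD ((lo + hi) / 2) 0 < x
      · have hmr : (lo + hi) / 2 < r := (hiff _ hmlen).mp hv
        simp only [hv, if_true]
        exact ih _ _ (by omega) (by omega) hhi hlen
      · have hrm : r ≤ (lo + hi) / 2 := by
          by_contra hc
          exact hv ((hiff _ hmlen).mpr (by omega))
        simp only [hv, if_false]
        exact ih _ _ (by omega) hlo hrm (by omega)
    · simp [h]; omega

-- On a sorted list, the binary search computes the number of values below x.
lemma rankB_eq_countP (vs : List Int) (x : Int) (hs : vs.Pairwise (· ≤ ·)) :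
    rankB vs x 0 vs.length = vs.countP (fun v => decide (v < x)) := by
  apply rankB_eq_of_iff vs x _ (sorted_lt_iff_lt_countP x vs hs) vs.length
  · omega
  · omega
  · exact List.countP_le_length
  · exact le_rfl

-- The half-open bin count equals the clamped difference of the two boundary counts.
lemma count_band_eq (vs : List Int) (s t : Int) :
    ((vs.filter (fun v => decide (s ≤ v) && decide (v < t))).length : Int)
      = max 0 ((vs.countP (fun v => decide (v < t)) : Int)
               - (vs.countP (fun v => decide (v < s)) : Int)) := by
  rw [← List.countP_eq_length_filter]
  by_cases hst : s ≤ t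
  · have key : vs.countP (fun v => decide (v < t))
        = vs.countP (fun v => decide (v < s)) + vs.countP (fun v => decide (s ≤ v) && decide (v < t)) := by
      induction vs with
      | nil => simp
      | cons a tl ih =>
        simp only [List.countP_cons, ih]
        by_cases h1 : a < s <;> by_cases h2 : a < t <;> by_cases h3 : s ≤ a <;>
          simp [h1, h2, h3] <;> omega
    rw [key]
    push_cast
    omega
  · have h0 : vs.countP (fun v => decide (s ≤ v) && decide (v < t)) = 0 := by
      apply List.countP_eq_zero.mpr
      intro b _; simp; omega
    have hle : vs.countP (fun v => decide (v < t)) ≤ vs.countP (fun v => decide (v < s)) := by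
      apply List.countP_mono_left
      intro b _ hb; simp at hb ⊢; omega
    rw [h0]
    push_cast
    omega

-- The lockstep walk of B over bounds and their ranks reproduces A's per-bin scans.
lemma histB_eq_histA (vs : List Int) (fn : String) (hs : vs.Pairwise (· ≤ ·)) :
    ∀ bs : List Int,
      histB fn bs (bs.map (fun b => rankB vs b 0 vs.length)) = histA vs fn bs := by
  intro bs
  induction bs with
  | nil => rfl
  | cons s bs ih =>
    cases bs with
    | nil => rfl
    | cons t rest =>
      simp only [List.map, histB, histA]
      rw [← ih]
      congr 1
      rw [rankB_eq_countP vs s hs, rankB_eq_countP vs t hs, count_band_eq]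

-- ===== VERDICT (by name: the statement is the Claim_ definition above) =====
theorem get_histogram_spec : Claim_equal_get_histogram := by
  intro values ranges field_name _
  unfold Spec_get_histogram get_histogram get_histogram_alt
  by_cases h : values = [] ∨ ranges = []
  · simp [h]
  · push Not at h
    have hr : ranges ≠ [] := h.2
    simp only [h.1, h.2, or_self, if_false]
    have hs : (PySem.List.sorted values (fun x => x) false).Pairwise (· ≤ ·) :=
      PySem.List.sorted_pairwise values (fun x => x)
    rw [histB_eq_histA _ _ hs]
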